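-- pv_equiv track=rewrite | github.com/AishwaryaRK/Code | GoogleCodeJam/TicketTrouble.py | max_friends_on_same_row
-- ===== SOURCE A (Python) =====
-- def max_friends_on_same_row(seats, S):
--     count = 0
--     for i in range(1, S + 1):
--         r = 0
--         for seat in seats:
--             if seat[0] == i:
--                 r += 1
--             elif seat[1] > seat[0] and seat[1] == i:
--                 r += 1
--         if r > count:
--             count = r
--
--     return count
-- ===== SOURCE B (Python) =====
-- def max_friends_on_same_row(seats, S):
--     if S < 1:
--         return 0
--     rows = []
--     for seat in seats:
--         a = seat[0]
--         if 1 <= a <= S: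
--             rows.append(a)
--         if len(seat) > 1:
--             b = seat[1]
--             if b > a and 1 <= b <= S:
--                 rows.append(b)
--     counts = {}
--     for r in rows:
--         counts[r] = counts.get(r, 0) + 1
--     best = 0
--     for v in counts.values():
--         if v > best:
--             best = v
--     return best
-- ===== Notes on version B (the rewrite author's own statement) =====
-- stated objective: faster
-- what changed: A scans all seats once per row index 1..S (nested loops); B makes one pass over the seats collecting occupied row numbers, one counting pass over that list with a dict, and returns the max count, so the loop over row indices disappears.
import Mathlib
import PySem

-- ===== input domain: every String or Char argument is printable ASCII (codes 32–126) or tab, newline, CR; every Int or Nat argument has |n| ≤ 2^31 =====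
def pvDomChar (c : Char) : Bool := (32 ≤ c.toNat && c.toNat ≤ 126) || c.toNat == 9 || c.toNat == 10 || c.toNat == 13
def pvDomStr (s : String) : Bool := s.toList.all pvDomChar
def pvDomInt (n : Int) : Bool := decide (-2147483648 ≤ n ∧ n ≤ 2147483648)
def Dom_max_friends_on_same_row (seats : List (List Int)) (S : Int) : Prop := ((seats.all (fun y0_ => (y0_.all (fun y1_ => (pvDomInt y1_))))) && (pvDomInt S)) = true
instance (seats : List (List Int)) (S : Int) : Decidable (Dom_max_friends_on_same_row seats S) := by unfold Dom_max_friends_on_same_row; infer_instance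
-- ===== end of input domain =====

-- B replaces A's scan of all seats once per row index 1..S by one collect pass over the seats,
-- one counting pass over the collected row numbers, and a max over the counts.

-- ===== PORT A =====
def max_friends_on_same_row (seats : List (List Int)) (S : Int) : Int :=
  (PySem.List.pyRange 1 (S + 1) 1).foldl
    (fun count i =>
      let r := seats.foldl
        (fun r seat =>
          if PySem.List.pyGetD seat 0 0 = i then r + 1
          else if PySem.List.pyGetD seat 1 0 > PySem.List.pyGetD seat 0 0 ∧
                  PySem.List.pyGetD seat 1 0 = i then r + 1
          else r) 0
      if r > count then r else count) 0

-- ===== PORT B =====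
-- one step of B's collect loop: append seat[0] when in 1..S, then seat[1] when the seat
-- lists a second entry, it is larger than the first, and it is in 1..S
def pvRowsStep (S : Int) (rows : List Int) (seat : List Int) : List Int :=
  let a := PySem.List.pyGetD seat 0 0
  let rows := if 1 ≤ a ∧ a ≤ S then rows ++ [a] else rows
  if 1 < seat.length then
    let b := PySem.List.pyGetD seat 1 0
    if b > a ∧ 1 ≤ b ∧ b ≤ S then rows ++ [b] else rows
  else rows

-- B's counting pass: counts[r] = counts.get(r, 0) + 1 over the collected rows
def pvCounts (rows : List Int) : PySem.Dict Int Int :=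
  rows.foldl (fun (d : PySem.Dict Int Int) r => d.insert r (d.getD r 0 + 1)) PySem.Dict.empty

def max_friends_on_same_row_alt (seats : List (List Int)) (S : Int) : Int :=
  if S < 1 then 0
  else
    (pvCounts (seats.foldl (pvRowsStep S) [])).values.foldl
      (fun best v => if v > best then v else best) 0

-- ===== PRECONDITION & SPEC =====
-- Pre_ excludes exactly the inputs on which Python A raises IndexError: S ≥ 1 and some seat row has
-- fewer than two entries, except the corner seat [1] with S = 1 where A's short-circuit never reaches
-- seat[1] (A returns there, and that corner is inside Pre_).
def Pre_max_friends_on_same_row (seats : List (List Int)) (S : Int) : Prop :=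
  S ≤ 0 ∨ ∀ s ∈ seats, 2 ≤ s.length ∨ (S = 1 ∧ s = [1])
instance (seats : List (List Int)) (S : Int) : Decidable (Pre_max_friends_on_same_row seats S) := by unfold Pre_max_friends_on_same_row; infer_instance

def pvWitness_max_friends_on_same_row : List (List Int) × Int := ([[1, 2], [3, 1], [1, 1]], 3)

def Spec_max_friends_on_same_row (seats : List (List Int)) (S : Int) (out : Int) : Prop := out = max_friends_on_same_row_alt seats S
instance (seats : List (List Int)) (S : Int) (out : Int) : Decidable (Spec_max_friends_on_same_row seats S out) := by unfold Spec_max_friends_on_same_row; infer_instance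

-- ===== CLAIM (what is proved, stated in full; the proofs are below) =====
def Claim_equal_max_friends_on_same_row : Prop := ∀ (seats : List (List Int)) (S : Int), Dom_max_friends_on_same_row seats S → Pre_max_friends_on_same_row seats S → Spec_max_friends_on_same_row seats S (max_friends_on_same_row seats S)

-- ===== LEMMAS AND PROOFS =====

-- pvRowsStep with its local bindings expanded (definitional)
theorem pvRowsStep_eq (S : Int) (rows seat : List Int) :
    pvRowsStep S rows seat =
      (if 1 < seat.length then
        (if PySem.List.pyGetD seat 1 0 > PySem.List.pyGetD seat 0 0 ∧
            1 ≤ PySem.List.pyGetD seat 1 0 ∧ PySem.List.pyGetD seat 1 0 ≤ S then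
          (if 1 ≤ PySem.List.pyGetD seat 0 0 ∧ PySem.List.pyGetD seat 0 0 ≤ S then
            rows ++ [PySem.List.pyGetD seat 0 0] else rows) ++ [PySem.List.pyGetD seat 1 0]
        else
          (if 1 ≤ PySem.List.pyGetD seat 0 0 ∧ PySem.List.pyGetD seat 0 0 ≤ S then
            rows ++ [PySem.List.pyGetD seat 0 0] else rows))
      else
        (if 1 ≤ PySem.List.pyGetD seat 0 0 ∧ PySem.List.pyGetD seat 0 0 ≤ S then
          rows ++ [PySem.List.pyGetD seat 0 0] else rows)) := rfl

-- B's counting pass builds exactly the Counter of the collected list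
theorem pvCounts_eq_counter (rows : List Int) : pvCounts rows = PySem.Dict.counter rows := by
  rw [pvCounts, PySem.Dict.foldl_insert_getD_add_one_eq_counter]

-- a running 'if g x > c then g x else c' fold is the max-fold of the mapped list
theorem pv_foldl_ifmax_eq {α : Type} (g : α → Int) (l : List α) (init : Int) :
    l.foldl (fun c x => if g x > c then g x else c) init = (l.map g).foldl max init := by
  induction l generalizing init with
  | nil => rfl
  | cons a t ih =>
      simp only [List.foldl_cons, List.map_cons]
      rw [ih]
      congr 1
      rw [max_def]
      split_ifs <;> omega

-- how one seat changes the multiplicity of row i in B's collected list = A's branch for that seat,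
-- assuming the seat satisfies its Pre_ disjunct
theorem pv_rowsStep_count (S i : Int) (h1 : 1 ≤ i) (h2 : i ≤ S) (acc seat : List Int)
    (hseat : 2 ≤ seat.length ∨ (S = 1 ∧ seat = [1])) :
    ((pvRowsStep S acc seat).count i : Int) =
      if PySem.List.pyGetD seat 0 0 = i then (acc.count i : Int) + 1
      else if PySem.List.pyGetD seat 1 0 > PySem.List.pyGetD seat 0 0 ∧
              PySem.List.pyGetD seat 1 0 = i then (acc.count i : Int) + 1
      else (acc.count i : Int) := by
  rw [pvRowsStep_eq]
  rcases hseat with hlen | ⟨hS, hseat⟩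
  · rw [if_pos (by omega)]
    split_ifs with hb ha ha <;>
      try simp_all [List.count_append, List.count_singleton']
    all_goals try omega
  · subst hseat
    have hi : i = 1 := by omega
    subst hi
    simp [PySem.List.pyGetD, PySem.List.pyGet?, PySem.List.pyIdx?, hS, List.count_append]

-- the multiplicity of row i in B's collected list computes A's inner per-row count
theorem pv_build_count (S i : Int) (h1 : 1 ≤ i) (h2 : i ≤ S) :
    ∀ (seats : List (List Int)) (acc : List Int),
      (∀ s ∈ seats, 2 ≤ s.length ∨ (S = 1 ∧ s = [1])) →
      (((seats.foldl (pvRowsStep S) acc).count i : Int)) =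
        seats.foldl
          (fun r seat =>
            if PySem.List.pyGetD seat 0 0 = i then r + 1
            else if PySem.List.pyGetD seat 1 0 > PySem.List.pyGetD seat 0 0 ∧
                    PySem.List.pyGetD seat 1 0 = i then r + 1
            else r) ((acc.count i : Int)) := by
  intro seats
  induction seats with
  | nil => intro acc _; rfl
  | cons s t ih =>
      intro acc hall
      simp only [List.foldl_cons]
      rw [ih (pvRowsStep S acc s) (fun x hx => hall x (List.mem_cons_of_mem s hx))]
      congr 1
      exact pv_rowsStep_count S i h1 h2 acc s (hall s (List.mem_cons_self ..))

-- every row number B collects lies in 1..S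
theorem pv_build_mem (S : Int) :
    ∀ (seats : List (List Int)) (acc : List Int) (x : Int),
      x ∈ seats.foldl (pvRowsStep S) acc → x ∈ acc ∨ (1 ≤ x ∧ x ≤ S) := by
  intro seats
  induction seats with
  | nil => intro acc x h; exact Or.inl h
  | cons s t ih =>
      intro acc x h
      rcases ih (pvRowsStep S acc s) x h with h' | h'
      · rw [pvRowsStep_eq] at h'
        split_ifs at h' with hl hb ha ha ha <;>
          try simp only [List.mem_append, List.mem_singleton] at h'
        · rcases h' with (h' | h') | h'
          · exact Or.inl h'
          · subst h'; right; omega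
          · subst h'; right; omega
        · rcases h' with h' | h'
          · exact Or.inl h'
          · subst h'; right; omega
        · rcases h' with h' | h'
          · exact Or.inl h'
          · subst h'; right; omega
        · exact Or.inl h'
        · rcases h' with h' | h'
          · exact Or.inl h'
          · subst h'; right; omega
        · exact Or.inl h'
      · exact Or.inr h'

-- upper bound for a max-fold from a bound on the base and the members
theorem pv_foldl_max_le (l : List Int) (b : Int) (hb : 0 ≤ b) (h : ∀ x ∈ l, x ≤ b) :
    l.foldl max 0 ≤ b := by
  rcases PySem.List.foldl_max_mem l 0 with h0 | hm
  · rw [h0]; exact hb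
  · exact h _ hm

theorem max_friends_on_same_row_spec : Claim_equal_max_friends_on_same_row := by
  intro seats S _ hPre
  unfold Spec_max_friends_on_same_row max_friends_on_same_row max_friends_on_same_row_alt
  by_cases hS : S < 1
  · rw [if_pos hS, PySem.List.pyRange_one_eq_nil (by omega)]
    rfl
  · rw [if_neg hS]
    have hall : ∀ s ∈ seats, 2 ≤ s.length ∨ (S = 1 ∧ s = [1]) := by
      rcases hPre with h | h
      · omega
      · exact h
    have hA :
        (fun (count i : Int) =>
          let r := seats.foldl
            (fun r seat =>
              if PySem.List.pyGetD seat 0 0 = i then r + 1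
              else if PySem.List.pyGetD seat 1 0 > PySem.List.pyGetD seat 0 0 ∧
                      PySem.List.pyGetD seat 1 0 = i then r + 1
              else r) 0
          if r > count then r else count)
        = (fun (count i : Int) =>
            if (seats.foldl
              (fun r seat =>
                if PySem.List.pyGetD seat 0 0 = i then r + 1
                else if PySem.List.pyGetD seat 1 0 > PySem.List.pyGetD seat 0 0 ∧
                        PySem.List.pyGetD seat 1 0 = i then r + 1
                else r) 0) > count then (seats.foldl
              (fun r seat =>
                if PySem.List.pyGetD seat 0 0 = i then r + 1
                else if PySem.List.pyGetD seat 1 0 > PySem.List.pyGetD seat 0 0 ∧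
                        PySem.List.pyGetD seat 1 0 = i then r + 1
                else r) 0) else count) := rfl
    rw [hA, pv_foldl_ifmax_eq, pvCounts_eq_counter, pv_foldl_ifmax_eq (fun v : Int => v)]
    rw [List.map_id']
    have hvals : (PySem.Dict.counter (seats.foldl (pvRowsStep S) [])).values
        = (PySem.Set.ofList (seats.foldl (pvRowsStep S) [])).map
            (fun k => ((seats.foldl (pvRowsStep S) []).count k : Int)) := by
      simp [PySem.Dict.values, PySem.Dict.items_counter, List.map_map, Function.comp]
    rw [hvals]
    have hcount : ∀ i : Int, 1 ≤ i → i ≤ S →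
        seats.foldl
          (fun r seat =>
            if PySem.List.pyGetD seat 0 0 = i then r + 1
            else if PySem.List.pyGetD seat 1 0 > PySem.List.pyGetD seat 0 0 ∧
                    PySem.List.pyGetD seat 1 0 = i then r + 1
            else r) 0 = ((seats.foldl (pvRowsStep S) []).count i : Int) := by
      intro i hi1 hi2
      have := pv_build_count S i hi1 hi2 seats [] hall
      simpa using this.symm
    apply le_antisymm
    · apply pv_foldl_max_le _ _ (PySem.List.le_foldl_max _ 0).1
      intro x hx
      rw [List.mem_map] at hx
      obtain ⟨i, hi, hEq⟩ := hx
      rw [PySem.List.mem_pyRange_one] at hi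
      rw [← hEq, hcount i hi.1 (by omega)]
      rcases Nat.eq_zero_or_pos ((seats.foldl (pvRowsStep S) []).count i) with hc | hc
      · rw [hc]
        exact le_trans (by norm_num) ((PySem.List.le_foldl_max _ 0).1)
      · have hiR : i ∈ seats.foldl (pvRowsStep S) [] := List.count_pos_iff.mp hc
        exact (PySem.List.le_foldl_max _ 0).2 _
          (List.mem_map.mpr ⟨i, (PySem.Set.mem_ofList _ i).mpr hiR, rfl⟩)
    · apply pv_foldl_max_le _ _ (PySem.List.le_foldl_max _ 0).1
      intro x hx
      rw [List.mem_map] at hx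
      obtain ⟨k, hk, hEq⟩ := hx
      have hkR : k ∈ seats.foldl (pvRowsStep S) [] := (PySem.Set.mem_ofList _ k).mp hk
      have hkS : 1 ≤ k ∧ k ≤ S := by
        rcases pv_build_mem S seats [] k hkR with h | h
        · simp at h
        · exact h
      refine le_trans (le_of_eq ?_) ((PySem.List.le_foldl_max _ 0).2 _
        (List.mem_map.mpr ⟨k, PySem.List.mem_pyRange_one.mpr ⟨hkS.1, by omega⟩, rfl⟩))
      rw [← hEq, hcount k hkS.1 hkS.2]
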